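-- pv_equiv track=rewrite | github.com/NMikaa/TTS_pipelines | shared/data/audiobooks/filter.py | _has_repeated_words
-- ===== SOURCE A (Python) =====
-- MAX_REPEATED_WORDS = 3         # Same word repeated consecutively
--
-- def _has_repeated_words(text: str, max_repeat: int = MAX_REPEATED_WORDS) -> bool:
--     """Check for suspiciously repeated words."""
--     words = text.split()
--     if len(words) < max_repeat + 1:
--         return False
--     for i in range(len(words) - max_repeat):
--         if len(set(words[i:i + max_repeat + 1])) == 1:
--             return True
--     return False
-- ===== SOURCE B (Python) =====
-- MAX_REPEATED_WORDS = 3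
--
--
-- def _has_repeated_words(text: str, max_repeat: int = MAX_REPEATED_WORDS) -> bool:
--     """Check for suspiciously repeated words: one pass with a run counter."""
--     count = 0
--     prev = None
--     for w in text.split():
--         if w == prev:
--             count += 1
--         else:
--             prev = w
--             count = 1
--         if count >= max_repeat + 1:
--             return True
--     return False
-- ===== Notes on version B (the rewrite author's own statement) =====
-- stated objective: simpler
-- what changed: B replaces A's per-position rebuild of a set over each sliding window of max_repeat+1 words by a single pass over the words keeping only the previous word and a consecutive-run counter, returning as soon as the run reaches max_repeat+1; Pre_ restricts to the natural domain max_repeat >= 0 (negative thresholds make A's slice end negative, counting from the end of the list).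
-- outside the precondition, e.g. on _has_repeated_words('a', -2): A returns False, B returns True
import Mathlib
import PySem

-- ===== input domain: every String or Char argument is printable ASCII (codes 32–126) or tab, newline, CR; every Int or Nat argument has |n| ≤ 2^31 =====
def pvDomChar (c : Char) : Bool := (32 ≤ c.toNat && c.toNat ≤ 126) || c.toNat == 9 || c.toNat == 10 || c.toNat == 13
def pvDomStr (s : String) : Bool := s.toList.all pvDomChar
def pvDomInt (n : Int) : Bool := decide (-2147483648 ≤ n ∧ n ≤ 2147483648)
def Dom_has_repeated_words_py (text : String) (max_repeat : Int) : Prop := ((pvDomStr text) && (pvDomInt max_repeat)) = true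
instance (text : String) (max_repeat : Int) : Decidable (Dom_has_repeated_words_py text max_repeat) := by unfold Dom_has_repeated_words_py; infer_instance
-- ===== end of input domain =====

-- B replaces A's per-window set rebuild by one pass with a previous-word/run-counter accumulator (simpler decomposition).

-- ===== PORT A =====
def has_repeated_words_py (text : String) (max_repeat : Int) : Bool :=
  let words := PySem.Str.split₀ text
  if PySem.List.len words < max_repeat + 1 then false
  else
    (PySem.List.pyRange 0 (PySem.List.len words - max_repeat) 1).any fun i =>
      PySem.Set.len (PySem.Set.ofList (PySem.List.slice words (some i) (some (i + max_repeat + 1)))) == 1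

-- ===== PORT B =====
-- the for-loop of Source B with state (prev, count); returns true as soon as count reaches max_repeat+1
def hrwAltLoop (max_repeat : Int) : List String → Option String → Int → Bool
  | [], _, _ => false
  | w :: ws, prev, count =>
    let count' := if some w == prev then count + 1 else 1
    let prev' := if some w == prev then prev else some w
    if max_repeat + 1 ≤ count' then true else hrwAltLoop max_repeat ws prev' count'

def has_repeated_words_py_alt (text : String) (max_repeat : Int) : Bool :=
  hrwAltLoop max_repeat (PySem.Str.split₀ text) none 0

-- ===== PRECONDITION & SPEC =====
-- Pre_ restricts to the function's natural domain: a repeat threshold max_repeat ≥ 0. For negative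
-- max_repeat the window bound i + max_repeat + 1 is a negative slice end, counted from the end of the
-- list, and no behaviour there is specified (e.g. A("a", -2) = False while B("a", -2) = True).
def Pre_has_repeated_words_py (text : String) (max_repeat : Int) : Prop := 0 ≤ max_repeat
instance (text : String) (max_repeat : Int) : Decidable (Pre_has_repeated_words_py text max_repeat) := by unfold Pre_has_repeated_words_py; infer_instance
def pvWitness_has_repeated_words_py : String × Int := ("go go go stop", 1)

def Spec_has_repeated_words_py (text : String) (max_repeat : Int) (out : Bool) : Prop := out = has_repeated_words_py_alt text max_repeat
instance (text : String) (max_repeat : Int) (out : Bool) : Decidable (Spec_has_repeated_words_py text max_repeat out) := by unfold Spec_has_repeated_words_py; infer_instance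

-- ===== CLAIM (what is proved, stated in full; the proofs are below) =====
def Claim_equal_has_repeated_words_py : Prop := ∀ (text : String) (max_repeat : Int), Dom_has_repeated_words_py text max_repeat → Pre_has_repeated_words_py text max_repeat → Spec_has_repeated_words_py text max_repeat (has_repeated_words_py text max_repeat)

-- ===== LEMMAS AND PROOFS =====

-- both programs detect a window of k+1 consecutive equal words
def HasWin (k : Nat) (ws : List String) : Prop :=
  ∃ i w, i + k < ws.length ∧ (ws.drop i).take (k + 1) = List.replicate (k + 1) w

lemma HasWin_length_lt {k : Nat} {ws : List String} (h : HasWin k ws) : k < ws.length := by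
  obtain ⟨i, w, h1, _⟩ := h; omega

lemma HasWin_cons (k : Nat) (w : String) (ws : List String) :
    HasWin k (w :: ws) ↔ (k ≤ ws.length ∧ ws.take k = List.replicate k w) ∨ HasWin k ws := by
  constructor
  · rintro ⟨i, v, h1, h2⟩
    cases i with
    | zero =>
        left
        simp only [List.drop_zero, List.replicate_succ] at h2
        rw [List.take_succ_cons] at h2
        obtain ⟨hw, ht⟩ := List.cons.injEq .. ▸ h2
        subst hw
        exact ⟨by simpa using Nat.lt_succ_iff.mp (by simpa using h1), ht⟩
    | succ j =>
        right
        exact ⟨j, v, by simp at h1 ⊢; omega, by simpa using h2⟩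
  · rintro (⟨hlen, ht⟩ | ⟨i, v, h1, h2⟩)
    · exact ⟨0, w, by simpa using Nat.lt_succ_of_le hlen, by
        simp only [List.drop_zero, List.take_succ_cons, List.replicate_succ, ht]⟩
    · exact ⟨i + 1, v, by simp at h1 ⊢; omega, by simpa using h2⟩

lemma takeWhile_len_ge_iff (w : String) (k : Nat) (ws : List String) :
    k ≤ (ws.takeWhile (· == w)).length ↔ k ≤ ws.length ∧ ws.take k = List.replicate k w := by
  induction ws generalizing k with
  | nil => cases k <;> simp
  | cons x ws ih =>
      by_cases hx : x = w
      · subst hx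
        cases k with
        | zero => simp
        | succ j =>
            simp only [List.takeWhile_cons, beq_self_eq_true, if_true, List.length_cons,
              List.take_succ_cons, List.replicate_succ, Nat.succ_le_succ_iff]
            rw [ih j]
            constructor
            · rintro ⟨h1, h2⟩; exact ⟨by omega, by rw [h2]⟩
            · rintro ⟨h1, h2⟩
              obtain ⟨-, ht⟩ := List.cons.injEq .. ▸ h2
              exact ⟨by omega, ht⟩
      · cases k with
        | zero => simp
        | succ j =>
            simp only [List.takeWhile_cons, beq_iff_eq, hx, if_false, List.length_nil,
              List.take_succ_cons, List.replicate_succ]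
            constructor
            · omega
            · rintro ⟨-, h2⟩
              exact absurd (List.cons.injEq .. ▸ h2).1 hx

-- invariant of Source B's loop: with a current run of length c of word p still open,
-- the loop returns true iff the run extends to length ≥ k+1 or a fresh window lies в ws
lemma hrwAltLoop_some (k : Nat) (ws : List String) (p : String) (c : Int)
    (hc1 : 1 ≤ c) (hck : c ≤ (k : Int)) :
    hrwAltLoop (k : Int) ws (some p) c = true ↔
      ((k : Int) + 1 ≤ c + ((ws.takeWhile (· == p)).length : Int) ∨ HasWin k ws) := by
  induction ws generalizing p c with
  | nil =>
      simp only [hrwAltLoop]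
      constructor
      · intro h; exact absurd h (by simp)
      · rintro (h | h)
        · exfalso; simp at h; omega
        · exact absurd (HasWin_length_lt h) (by simp)
  | cons w ws ih =>
      by_cases hw : w = p
      · subst hw
        simp only [hrwAltLoop, beq_self_eq_true, if_true,
          List.takeWhile_cons, List.length_cons]
        by_cases hge : (k : Int) + 1 ≤ c + 1
        · rw [if_pos hge]
          simp only [true_iff]
          left
          push_cast
          omega
        · rw [if_neg hge]
          rw [ih w (c + 1) (by omega) (by omega)]
          rw [HasWin_cons]
          rw [← takeWhile_len_ge_iff w k ws]
          constructor
          · rintro (h | h)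
            · left; push_cast; omega
            · right; right; exact h
          · rintro (h | h | h)
            · left; push_cast; omega
            · left; push_cast; omega
            · right; exact h
      · simp only [hrwAltLoop, Option.some.injEq, beq_iff_eq, hw, if_false,
          List.takeWhile_cons]
        by_cases hk0 : (k : Int) + 1 ≤ 1
        · rw [if_pos hk0]
          have hk : k = 0 := by omega
          subst hk
          simp only [true_iff]
          right
          exact ⟨0, w, by simp, by simp⟩
        · rw [if_neg hk0]
          have hk1 : 1 ≤ (k : Int) := by omega
          rw [ih w 1 (by omega) hk1]
          rw [HasWin_cons]
          rw [← takeWhile_len_ge_iff w k ws]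
          constructor
          · rintro (h | h)
            · right; left; omega
            · right; right; exact h
          · rintro (h | h | h)
            · exfalso; simp at h; omega
            · left; push_cast; omega
            · right; exact h

lemma alt_iff (text : String) (k : Nat) :
    has_repeated_words_py_alt text (k : Int) = true ↔ HasWin k (PySem.Str.split₀ text) := by
  unfold has_repeated_words_py_alt
  cases hws : PySem.Str.split₀ text with
  | nil =>
      simp only [hrwAltLoop]
      constructor
      · intro h; exact absurd h (by simp)
      · intro h; exact absurd (HasWin_length_lt h) (by simp)
  | cons w ws =>
      simp only [hrwAltLoop]
      have hb : (some w == (none : Option String)) = false := rfl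
      rw [hb]
      simp only [Bool.false_eq_true, if_false]
      by_cases hk0 : (k : Int) + 1 ≤ 1
      · rw [if_pos hk0]
        have hk : k = 0 := by omega
        subst hk
        simp only [true_iff]
        exact ⟨0, w, by simp, by simp⟩
      · rw [if_neg hk0]
        have hk1 : 1 ≤ (k : Int) := by omega
        rw [hrwAltLoop_some k ws w 1 (by omega) hk1]
        rw [HasWin_cons]
        rw [← takeWhile_len_ge_iff w k ws]
        constructor
        · rintro (h | h)
          · left; omega
          · right; exact h
        · rintro (h | h)
          · left; push_cast; omega
          · right; exact h

-- set(window) has size 1 iff the window is nonempty and constant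
lemma ofList_length_one_iff (xs : List String) :
    (PySem.Set.ofList xs).length = 1 ↔ ∃ w, xs ≠ [] ∧ ∀ x ∈ xs, x = w := by
  constructor
  · intro h
    obtain ⟨w, hw⟩ := List.length_eq_one_iff.mp h
    refine ⟨w, ?_, ?_⟩
    · intro hnil; subst hnil; simp [PySem.Set.ofList] at hw
    · intro x hx
      have : x ∈ PySem.Set.ofList xs := (PySem.Set.mem_ofList _ _).mpr hx
      rw [hw] at this; simpa using this
  · rintro ⟨w, hne, hall⟩
    have hnd : (PySem.Set.ofList xs).Nodup := PySem.Set.nodup_ofList xs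
    have hmem : ∀ x ∈ PySem.Set.ofList xs, x = w := by
      intro x hx
      exact hall x ((PySem.Set.mem_ofList _ _).mp hx)
    have hwmem : w ∈ PySem.Set.ofList xs := by
      obtain ⟨x, hx⟩ := List.exists_mem_of_ne_nil xs hne
      have := hall x hx
      subst this
      exact (PySem.Set.mem_ofList _ _).mpr hx
    match h : PySem.Set.ofList xs with
    | [] => rw [h] at hwmem; simp at hwmem
    | [a] => rfl
    | a :: b :: t =>
        rw [h] at hnd hmem
        have ha : a = w := hmem a (by simp)
        have hb : b = w := hmem b (by simp)
        exfalso
        rw [List.nodup_cons] at hnd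
        exact hnd.1 (by simp [ha, hb])

lemma a_iff (text : String) (k : Nat) :
    has_repeated_words_py text (k : Int) = true ↔ HasWin k (PySem.Str.split₀ text) := by
  unfold has_repeated_words_py
  set ws := PySem.Str.split₀ text with hws
  show (if PySem.List.len ws < (k : Int) + 1 then false
    else (PySem.List.pyRange 0 (PySem.List.len ws - (k : Int)) 1).any fun i =>
      PySem.Set.len (PySem.Set.ofList (PySem.List.slice ws (some i) (some (i + (k : Int) + 1)))) == 1) = true
    ↔ HasWin k ws
  rw [PySem.List.len_eq]
  by_cases hlen : (ws.length : Int) < (k : Int) + 1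
  · rw [if_pos hlen]
    simp only [Bool.false_eq_true, false_iff]
    intro h
    have := HasWin_length_lt h
    omega
  · rw [if_neg hlen]
    rw [List.any_eq_true]
    constructor
    · rintro ⟨i, hi, hpred⟩
      rw [PySem.List.mem_pyRange_one] at hi
      obtain ⟨hi0, hi2⟩ := hi
      rw [PySem.List.slice_toNat _ hi0 (by omega)] at hpred
      have htn : ((i + (k : Int) + 1).toNat - i.toNat) = k + 1 := by omega
      rw [htn] at hpred
      rw [beq_iff_eq] at hpred
      have hone : ((ws.drop i.toNat).take (k + 1)).length = k + 1 := by
        rw [List.length_take, List.length_drop]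
        omega
      have : (PySem.Set.ofList ((ws.drop i.toNat).take (k + 1))).length = 1 := by
        have := hpred
        simp only [PySem.Set.len] at this
        exact_mod_cast this
      obtain ⟨w, hne, hall⟩ := (ofList_length_one_iff _).mp this
      refine ⟨i.toNat, w, by omega, ?_⟩
      rw [List.eq_replicate_iff]
      exact ⟨hone, hall⟩
    · rintro ⟨i, w, h1, h2⟩
      refine ⟨(i : Int), ?_, ?_⟩
      · rw [PySem.List.mem_pyRange_one]; omega
      · rw [PySem.List.slice_toNat _ (by omega) (by omega)]
        have htn : (((i : Int) + (k : Int) + 1).toNat - (i : Int).toNat) = k + 1 := by omega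
        rw [htn, Int.toNat_natCast, h2]
        rw [beq_iff_eq]
        simp only [PySem.Set.len]
        have : PySem.Set.ofList (List.replicate (k + 1) w) = [w] := by
          have := (ofList_length_one_iff (List.replicate (k + 1) w)).mpr
            ⟨w, by simp, by intro x hx; exact List.eq_of_mem_replicate hx⟩
          obtain ⟨a, ha⟩ := List.length_eq_one_iff.mp this
          have haw : a = w := by
            have : a ∈ PySem.Set.ofList (List.replicate (k + 1) w) := by rw [ha]; simp
            exact List.eq_of_mem_replicate ((PySem.Set.mem_ofList _ _).mp this)
          rw [ha, haw]
        rw [this]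
        rfl

-- ===== VERDICT (by name: the statement is the Claim_ definition above) =====
theorem has_repeated_words_py_spec : Claim_equal_has_repeated_words_py := by
  intro text max_repeat _ hpre
  unfold Spec_has_repeated_words_py
  have hpre' : 0 ≤ max_repeat := hpre
  obtain ⟨k, rfl⟩ : ∃ k : Nat, max_repeat = (k : Int) :=
    ⟨max_repeat.toNat, by omega⟩
  have hA := a_iff text k
  have hB := alt_iff text k
  cases hA' : has_repeated_words_py text (k : Int) <;>
    cases hB' : has_repeated_words_py_alt text (k : Int)
  · rfl
  · exact absurd (hA.mpr (hB.mp hB')) (by simp [hA'])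
  · exact absurd (hB.mpr (hA.mp hA')) (by simp [hB'])
  · rfl
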